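-- pv_equiv track=rewrite | github.com/kronael/rsx | rsx-playground/pages.py | render_risk_user_wal
-- ===== SOURCE A (Python) =====
-- _TH = ('class="text-left py-1.5 px-2 text-[10px] '
--        'text-slate-500 uppercase tracking-wider '
--        'border-b border-slate-800 font-semibold"')
--
-- _TD = ('class="py-1.5 px-2 text-xs border-b '
--        'border-slate-800/50"')
--
-- def _table(headers, rows_html):
--     ths = "".join(f"<th {_TH}>{h}</th>" for h in headers)
--     return (
--         f'<div class="overflow-x-auto">'
--         f'<table class="w-full table-auto">'
--         f'<thead><tr>{ths}</tr></thead>'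
--         f'<tbody>{rows_html}</tbody></table>'
--         f'</div>'
--     )
--
-- def render_risk_user_wal(user_id: int, fills: list):
--     """Render net positions for a user from WAL fill records."""
--     positions: dict[int, dict] = {}
--     for f in fills:
--         sid = f.get("symbol_id", 0)
--         qty = f.get("qty", 0)
--         side = f.get("taker_side", 0)
--         is_taker = f.get("taker_uid") == user_id
--         # taker buys: side=0 → long; taker sells: side=1 → short
--         # maker is opposite side
--         if is_taker:
--             signed = qty if side == 0 else -qty
--         else:
--             signed = -qty if side == 0 else qty
--         entry = positions.setdefault(
--             sid, {"net": 0, "fills": 0}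
--         )
--         entry["net"] += signed
--         entry["fills"] += 1
--     if not positions:
--         return ('<span class="text-slate-500 text-xs">'
--                 f'user {user_id} — no fills in WAL</span>')
--     rows = ""
--     for sid, info in sorted(positions.items()):
--         sym = SYMBOL_NAMES.get(sid, f"sym-{sid}")
--         net = info["net"]
--         n = info["fills"]
--         net_str = format_qty(abs(net), sid)
--         if net > 0:
--             color = "text-emerald-400"
--             label = f"+{net_str}"
--         elif net < 0:
--             color = "text-red-400"
--             label = f"-{net_str}"
--         else:
--             color = "text-slate-500"
--             label = "0"
--         rows += (
--             f'<tr class="hover:bg-slate-800/50">'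
--             f'<td {_TD}>{sym}</td>'
--             f'<td {_TD}>'
--             f'<span class="{color}">{label}</span></td>'
--             f'<td {_TD} class="text-slate-500">{n}</td>'
--             f'</tr>'
--         )
--     return _table(
--         ["Symbol", "Net (WAL)", "Fills"], rows,
--     )
--
-- SYMBOL_NAMES = {
--     1: "BTC", 2: "ETH", 3: "SOL", 10: "PENGU",
-- }
--
-- SYMBOL_CONFIG = {
--     1: {"price_decimals": 2, "qty_decimals": 8},    # BTC
--     2: {"price_decimals": 2, "qty_decimals": 6},    # ETH
--     3: {"price_decimals": 4, "qty_decimals": 4},    # SOL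
--     10: {"price_decimals": 6, "qty_decimals": 2},   # PENGU
-- }
--
-- def format_qty(raw_qty, symbol_id):
--     """Format raw i64 qty for display."""
--     if raw_qty == 0:
--         return "0"
--     cfg = SYMBOL_CONFIG.get(symbol_id, {"qty_decimals": 2})
--     decimals = cfg["qty_decimals"]
--     if decimals == 0:
--         return str(raw_qty)
--     sign = "-" if raw_qty < 0 else ""
--     abs_val = abs(raw_qty)
--     scale = 10 ** decimals
--     whole = abs_val // scale
--     frac = abs_val % scale
--     return f"{sign}{whole}.{frac:0{decimals}d}".rstrip('0').rstrip('.')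
-- ===== SOURCE B (Python) =====
-- # B: sort-then-group aggregation (sorted + itertools.groupby) instead of
-- # incremental dict accumulation; same rendering helpers as the module.
-- from itertools import groupby
--
-- _TH = ('class="text-left py-1.5 px-2 text-[10px] '
--        'text-slate-500 uppercase tracking-wider '
--        'border-b border-slate-800 font-semibold"')
--
-- _TD = ('class="py-1.5 px-2 text-xs border-b '
--        'border-slate-800/50"')
--
-- SYMBOL_NAMES = {
--     1: "BTC", 2: "ETH", 3: "SOL", 10: "PENGU",
-- }
--
-- SYMBOL_CONFIG = {
--     1: {"price_decimals": 2, "qty_decimals": 8},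
--     2: {"price_decimals": 2, "qty_decimals": 6},
--     3: {"price_decimals": 4, "qty_decimals": 4},
--     10: {"price_decimals": 6, "qty_decimals": 2},
-- }
--
-- def format_qty(raw_qty, symbol_id):
--     """Format raw i64 qty for display."""
--     if raw_qty == 0:
--         return "0"
--     cfg = SYMBOL_CONFIG.get(symbol_id, {"qty_decimals": 2})
--     decimals = cfg["qty_decimals"]
--     if decimals == 0:
--         return str(raw_qty)
--     sign = "-" if raw_qty < 0 else ""
--     abs_val = abs(raw_qty)
--     scale = 10 ** decimals
--     whole = abs_val // scale
--     frac = abs_val % scale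
--     return f"{sign}{whole}.{frac:0{decimals}d}".rstrip('0').rstrip('.')
--
-- def _table(headers, rows_html):
--     ths = "".join(f"<th {_TH}>{h}</th>" for h in headers)
--     return (
--         f'<div class="overflow-x-auto">'
--         f'<table class="w-full table-auto">'
--         f'<thead><tr>{ths}</tr></thead>'
--         f'<tbody>{rows_html}</tbody></table>'
--         f'</div>'
--     )
--
-- def _row(sid, net, n):
--     sym = SYMBOL_NAMES.get(sid, f"sym-{sid}")
--     net_str = format_qty(abs(net), sid)
--     if net > 0:
--         color, label = "text-emerald-400", f"+{net_str}"
--     elif net < 0: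
--         color, label = "text-red-400", f"-{net_str}"
--     else:
--         color, label = "text-slate-500", "0"
--     return (
--         f'<tr class="hover:bg-slate-800/50">'
--         f'<td {_TD}>{sym}</td>'
--         f'<td {_TD}>'
--         f'<span class="{color}">{label}</span></td>'
--         f'<td {_TD} class="text-slate-500">{n}</td>'
--         f'</tr>'
--     )
--
-- def render_risk_user_wal(user_id: int, fills: list):
--     """Render net positions for a user from WAL fill records."""
--     if not fills:
--         return ('<span class="text-slate-500 text-xs">'
--                 f'user {user_id} — no fills in WAL</span>')
--     keyed = sorted(
--         ((f.get("symbol_id", 0),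
--           f.get("qty", 0)
--           if (f.get("taker_uid") == user_id) == (f.get("taker_side", 0) == 0)
--           else -f.get("qty", 0))
--          for f in fills),
--         key=lambda p: p[0])
--     rows = []
--     for sid, grp in groupby(keyed, key=lambda p: p[0]):
--         qs = [q for _, q in grp]
--         rows.append(_row(sid, sum(qs), len(qs)))
--     return _table(["Symbol", "Net (WAL)", "Fills"], "".join(rows))
-- ===== Notes on version B (the rewrite author's own statement) =====
-- stated objective: alternative
-- what changed: Replaces the incremental dict accumulation (setdefault + in-place mutation, then sorting the items) with a sort-then-group aggregation: each fill is mapped to its (symbol_id, signed qty), the list is sorted by symbol_id once, and itertools.groupby folds each run into net = sum and fills = len, emitting rows directly in ascending symbol order.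
import Mathlib
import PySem

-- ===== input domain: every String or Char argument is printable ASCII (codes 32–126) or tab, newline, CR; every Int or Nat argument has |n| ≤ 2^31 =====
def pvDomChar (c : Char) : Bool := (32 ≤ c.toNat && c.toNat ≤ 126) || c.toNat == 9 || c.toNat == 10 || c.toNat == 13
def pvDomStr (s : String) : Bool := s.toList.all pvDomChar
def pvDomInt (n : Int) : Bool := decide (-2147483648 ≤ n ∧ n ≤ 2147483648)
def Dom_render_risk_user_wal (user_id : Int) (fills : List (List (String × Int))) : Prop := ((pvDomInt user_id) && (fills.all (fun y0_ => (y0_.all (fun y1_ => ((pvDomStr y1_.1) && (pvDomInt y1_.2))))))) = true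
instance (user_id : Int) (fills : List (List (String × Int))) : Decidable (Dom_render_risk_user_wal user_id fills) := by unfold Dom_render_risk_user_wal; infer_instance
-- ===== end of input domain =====

-- B re-implements the aggregation as sort-then-group (à la itertools.groupby) instead of A's
-- incremental dict accumulation; rendering helpers are the module's, shared by both ports.

-- ===== shared module-level helpers (the same-module context _TH/_TD/_table/SYMBOL_NAMES/SYMBOL_CONFIG/format_qty) =====
def pvTH : String := "class=\"text-left py-1.5 px-2 text-[10px] text-slate-500 uppercase tracking-wider border-b border-slate-800 font-semibold\""
def pvTD : String := "class=\"py-1.5 px-2 text-xs border-b border-slate-800/50\""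

-- SYMBOL_NAMES.get(sid, f"sym-{sid}")
def pvSymbolName (sid : Int) : String :=
  if sid = 1 then "BTC" else if sid = 2 then "ETH" else if sid = 3 then "SOL"
  else if sid = 10 then "PENGU" else "sym-" ++ PySem.Int.toStr sid

-- SYMBOL_CONFIG.get(sid, {"qty_decimals": 2})["qty_decimals"]
def pvQtyDecimals (sid : Int) : Int :=
  if sid = 1 then 8 else if sid = 2 then 6 else if sid = 3 then 4
  else if sid = 10 then 2 else 2

-- hand port of s.rstrip(chars) (PySem has no chars-argument rstrip): drop trailing chars that
-- are in cs; exact for every string (rstrip scans from the right)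
def pvRstrip (s : String) (cs : List Char) : String :=
  String.ofList ((s.toList.reverse.dropWhile (fun c => cs.contains c)).reverse)

-- format_qty; f"{frac:0{d}d}" for frac ≥ 0 is str(frac).zfill(d) (exact: frac is a nonneg int here);
-- 10 ** decimals with decimals ≥ 0 is 10 ^ decimals.toNat
def pvFormatQty (raw_qty symbol_id : Int) : String :=
  if raw_qty = 0 then "0" else
  let decimals := pvQtyDecimals symbol_id
  if decimals = 0 then PySem.Int.toStr raw_qty else
  let sign := if raw_qty < 0 then "-" else ""
  let scale : Int := 10 ^ decimals.toNat
  let whole := PySem.Int.floordiv |raw_qty| scale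
  let frac := PySem.Int.mod |raw_qty| scale
  pvRstrip (pvRstrip (sign ++ PySem.Int.toStr whole ++ "." ++ PySem.Str.zfill (PySem.Int.toStr frac) decimals) ['0']) ['.']

def pvTable (headers : List String) (rows_html : String) : String :=
  let ths := PySem.Str.join "" (headers.map (fun h => "<th " ++ pvTH ++ ">" ++ h ++ "</th>"))
  "<div class=\"overflow-x-auto\"><table class=\"w-full table-auto\"><thead><tr>" ++ ths ++
    "</tr></thead><tbody>" ++ rows_html ++ "</tbody></table></div>"

def pvNoFills (user_id : Int) : String :=
  "<span class=\"text-slate-500 text-xs\">user " ++ PySem.Int.toStr user_id ++ " — no fills in WAL</span>"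

-- ===== PORT A =====
-- positions' per-symbol dict {"net": …, "fills": …} has the fixed keys net/fills: ported as the
-- pair (net, fills); sorted(positions.items()) compares (key, value) tuples, and the keys are
-- distinct, so it is the sort by key.
def render_risk_user_wal (user_id : Int) (fills : List (List (String × Int))) : String :=
  let positions : PySem.Dict Int (Int × Int) :=
    fills.foldl (fun d f =>
      let fd := PySem.Dict.mk f
      let sid := fd.getD "symbol_id" 0
      let qty := fd.getD "qty" 0
      let side := fd.getD "taker_side" 0
      let is_taker := fd.get? "taker_uid" == some user_id
      let signed := if is_taker then (if side = 0 then qty else -qty)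
                    else (if side = 0 then -qty else qty)
      -- entry = positions.setdefault(sid, {...}); entry[...] += …  ≡  d[sid] = f(d.get(sid, (0,0)))
      d.modify sid (0, 0) (fun e => (e.1 + signed, e.2 + 1))) PySem.Dict.empty
  if positions.items = [] then pvNoFills user_id
  else
    let rows := (PySem.List.sorted positions.items (fun p => p.1) false).foldl
      (fun acc p =>
        let sid := p.1
        let net := p.2.1
        let n := p.2.2
        let sym := pvSymbolName sid
        let net_str := pvFormatQty |net| sid
        let cl := if net > 0 then ("text-emerald-400", "+" ++ net_str)
                  else if net < 0 then ("text-red-400", "-" ++ net_str)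
                  else ("text-slate-500", "0")
        acc ++ ("<tr class=\"hover:bg-slate-800/50\"><td " ++ pvTD ++ ">" ++ sym ++ "</td><td " ++
          pvTD ++ "><span class=\"" ++ cl.1 ++ "\">" ++ cl.2 ++ "</span></td><td " ++ pvTD ++
          " class=\"text-slate-500\">" ++ PySem.Int.toStr n ++ "</td></tr>")) ""
    pvTable ["Symbol", "Net (WAL)", "Fills"] rows

-- ===== PORT B =====
-- Source B's _row helper
def pvRow (sid net n : Int) : String :=
  let sym := pvSymbolName sid
  let net_str := pvFormatQty |net| sid
  let cl := if net > 0 then ("text-emerald-400", "+" ++ net_str)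
            else if net < 0 then ("text-red-400", "-" ++ net_str)
            else ("text-slate-500", "0")
  "<tr class=\"hover:bg-slate-800/50\"><td " ++ pvTD ++ ">" ++ sym ++ "</td><td " ++
    pvTD ++ "><span class=\"" ++ cl.1 ++ "\">" ++ cl.2 ++ "</span></td><td " ++ pvTD ++
    " class=\"text-slate-500\">" ++ PySem.Int.toStr n ++ "</td></tr>"

-- itertools.groupby over the key-sorted pair list, each group consumed as its list of qtys
def pvGroupRuns : List (Int × Int) → List (Int × List Int)
  | [] => []
  | (k, v) :: t =>
      (k, v :: (t.takeWhile (fun p => p.1 == k)).map (fun p => p.2)) ::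
        pvGroupRuns (t.dropWhile (fun p => p.1 == k))
  termination_by l => l.length
  decreasing_by
    simp only [List.length_cons]
    exact Nat.lt_succ_of_le (List.length_dropWhile_le _ _)

def render_risk_user_wal_alt (user_id : Int) (fills : List (List (String × Int))) : String :=
  if fills = [] then pvNoFills user_id
  else
    let keyed := PySem.List.sorted
      (fills.map (fun f =>
        let fd := PySem.Dict.mk f
        (fd.getD "symbol_id" 0,
         if (fd.get? "taker_uid" == some user_id) = (fd.getD "taker_side" 0 == 0)
         then fd.getD "qty" 0 else -(fd.getD "qty" 0))))
      (fun p => p.1) false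
    let rows := (pvGroupRuns keyed).map (fun g => pvRow g.1 g.2.sum (g.2.length : Int))
    pvTable ["Symbol", "Net (WAL)", "Fills"] (PySem.Str.join "" rows)

-- ===== PRECONDITION & SPEC =====
def Spec_render_risk_user_wal (user_id : Int) (fills : List (List (String × Int))) (out : String) : Prop := out = render_risk_user_wal_alt user_id fills
instance (user_id : Int) (fills : List (List (String × Int))) (out : String) : Decidable (Spec_render_risk_user_wal user_id fills out) := by unfold Spec_render_risk_user_wal; infer_instance

-- ===== CLAIM (what is proved, stated in full; the proofs are below) =====
def Claim_equal_render_risk_user_wal : Prop := ∀ (user_id : Int) (fills : List (List (String × Int))), Dom_render_risk_user_wal user_id fills → Spec_render_risk_user_wal user_id fills (render_risk_user_wal user_id fills)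


-- ===== LEMMAS AND PROOFS =====

-- the per-fill symbol id and signed quantity (proof-side abbreviations)
def pvSid (f : List (String × Int)) : Int := (PySem.Dict.mk f).getD "symbol_id" 0

def pvSgn (u : Int) (f : List (String × Int)) : Int :=
  if ((PySem.Dict.mk f).get? "taker_uid" == some u) = ((PySem.Dict.mk f).getD "taker_side" 0 == 0)
  then (PySem.Dict.mk f).getD "qty" 0 else -((PySem.Dict.mk f).getD "qty" 0)

def pvPre (u : Int) (f : List (String × Int)) : Int × Int := (pvSid f, pvSgn u f)

def pvStep (u : Int) (d : PySem.Dict Int (Int × Int)) (f : List (String × Int)) :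
    PySem.Dict Int (Int × Int) :=
  d.modify (pvSid f) (0, 0) (fun e => (e.1 + pvSgn u f, e.2 + 1))

def netOf (u : Int) (fills : List (List (String × Int))) (k : Int) : Int :=
  ((fills.filter (fun f => pvSid f == k)).map (pvSgn u)).sum

def cntOf (fills : List (List (String × Int))) (k : Int) : Int :=
  ((fills.filter (fun f => pvSid f == k)).length : Int)

def pvCanon (fills : List (List (String × Int))) : List Int :=
  PySem.List.sorted (PySem.Set.ofList (fills.map pvSid)) (fun k => k) false

-- A's branch-by-taker signed quantity equals B's single-test form
theorem pvSgn_eq (u : Int) (f : List (String × Int)) :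
    (if ((PySem.Dict.mk f).get? "taker_uid" == some u)
     then (if (PySem.Dict.mk f).getD "taker_side" 0 = 0 then (PySem.Dict.mk f).getD "qty" 0
           else -((PySem.Dict.mk f).getD "qty" 0))
     else (if (PySem.Dict.mk f).getD "taker_side" 0 = 0 then -((PySem.Dict.mk f).getD "qty" 0)
           else (PySem.Dict.mk f).getD "qty" 0)) = pvSgn u f := by
  unfold pvSgn
  by_cases h1 : (PySem.Dict.mk f).get? "taker_uid" == some u <;>
    by_cases h2 : (PySem.Dict.mk f).getD "taker_side" 0 = 0 <;>
      simp [h1, h2]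

theorem pvStep_eq (u : Int) :
    (fun (d : PySem.Dict Int (Int × Int)) (f : List (String × Int)) =>
      let fd := PySem.Dict.mk f
      let sid := fd.getD "symbol_id" 0
      let qty := fd.getD "qty" 0
      let side := fd.getD "taker_side" 0
      let is_taker := fd.get? "taker_uid" == some u
      let signed := if is_taker then (if side = 0 then qty else -qty)
                    else (if side = 0 then -qty else qty)
      d.modify sid (0, 0) (fun e => (e.1 + signed, e.2 + 1))) = pvStep u := by
  funext d f
  show d.modify (pvSid f) (0,0) (fun e => (e.1 + _, e.2 + 1)) = _
  rw [pvSgn_eq u f]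
  rfl

-- running the dict loop: per-key net and fill count
theorem pvFold_getD (u : Int) (fs : List (List (String × Int)))
    (d : PySem.Dict Int (Int × Int)) (k : Int) :
    (fs.foldl (pvStep u) d).getD k (0, 0) =
      ((d.getD k (0, 0)).1 + netOf u fs k, (d.getD k (0, 0)).2 + cntOf fs k) := by
  induction fs generalizing d with
  | nil => simp [netOf, cntOf]
  | cons f t ih =>
    rw [List.foldl_cons, ih]
    show _ = (_ + netOf u (f :: t) k, _ + cntOf (f :: t) k)
    have hmod := PySem.Dict.getD_modify d (pvSid f) k (0, 0)
      (fun e => (e.1 + pvSgn u f, e.2 + 1))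
    by_cases hk : k = pvSid f
    · rw [show (pvStep u d f) = d.modify (pvSid f) (0,0) (fun e => (e.1 + pvSgn u f, e.2 + 1)) from rfl,
        hmod, if_pos hk]
      simp [netOf, cntOf, hk.symm]
      constructor <;> ring
    · rw [show (pvStep u d f) = d.modify (pvSid f) (0,0) (fun e => (e.1 + pvSgn u f, e.2 + 1)) from rfl,
        hmod, if_neg hk]
      have hne : (pvSid f == k) = false := by simp; exact fun h => hk h.symm
      simp [netOf, cntOf, hne]

theorem pvFold_keys (u : Int) (fs : List (List (String × Int))) :
    (fs.foldl (pvStep u) PySem.Dict.empty).keys = PySem.Set.ofList (fs.map pvSid) := by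
  have h := PySem.Dict.keys_foldl_modify_key fs pvSid ((0 : Int), (0 : Int))
    (fun _ f e => (e.1 + pvSgn u f, e.2 + 1)) PySem.Dict.empty
  rw [PySem.Dict.keys_empty] at h
  exact h

theorem pvFold_nodup (u : Int) (fs : List (List (String × Int))) :
    (fs.foldl (pvStep u) PySem.Dict.empty).keys.Nodup := by
  exact PySem.Dict.nodup_keys_foldl_modify_key fs pvSid ((0 : Int), (0 : Int))
    (fun _ f e => (e.1 + pvSgn u f, e.2 + 1)) PySem.Dict.empty
    (by rw [PySem.Dict.keys_empty]; exact List.nodup_nil)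

theorem pvCanon_mem (fills : List (List (String × Int))) (x : Int) :
    x ∈ pvCanon fills ↔ x ∈ fills.map pvSid := by
  unfold pvCanon
  rw [PySem.List.mem_sorted, PySem.Set.mem_ofList]

theorem pvCanon_nodup (fills : List (List (String × Int))) : (pvCanon fills).Nodup := by
  unfold pvCanon
  exact (PySem.List.sorted_perm _ _ _).nodup_iff.mpr (PySem.Set.nodup_ofList _)

theorem pvCanon_lt (fills : List (List (String × Int))) :
    (pvCanon fills).Pairwise (· < ·) := by
  have h1 : (pvCanon fills).Pairwise (· ≤ ·) := PySem.List.sorted_pairwise _ _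
  have h2 : (pvCanon fills).Pairwise (· ≠ ·) := pvCanon_nodup fills
  exact (h1.and h2).imp (fun h => lt_of_le_of_ne h.1 h.2)

-- "" .join over the collected row strings
theorem pvStrJoin_nil : PySem.Str.join "" ([] : List String) = "" := by
  simp [PySem.Str.join, PySem.Chars.join, List.intercalate]

theorem pvStrJoin_cons (a : String) (l : List String) :
    PySem.Str.join "" (a :: l) = a ++ PySem.Str.join "" l := by
  cases l <;> simp [PySem.Str.join, PySem.Chars.join, List.intercalate]

-- A's string-accumulating row loop is "" ++ "".join of the mapped rows
theorem pvStrFoldl {α : Type} (l : List α) (f : α → String) (s : String) :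
    l.foldl (fun acc x => acc ++ f x) s = s ++ PySem.Str.join "" (l.map f) := by
  induction l generalizing s with
  | nil => simp [pvStrJoin_nil]
  | cons a t ih => simp [ih, pvStrJoin_cons, String.append_assoc]

-- in a key-sorted run, takeWhile/dropWhile on the head key are filters
theorem pvTakeDrop (k : Int) (t : List (Int × Int))
    (hpw : t.Pairwise (fun a b => a.1 ≤ b.1)) (hk : ∀ p ∈ t, k ≤ p.1) :
    t.takeWhile (fun p => p.1 == k) = t.filter (fun p => p.1 == k) ∧
    t.dropWhile (fun p => p.1 == k) = t.filter (fun p => !(p.1 == k)) := by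
  induction t with
  | nil => simp
  | cons p t' ih =>
    rw [List.pairwise_cons] at hpw
    have hk0 : k ≤ p.1 := hk p (List.mem_cons_self)
    have hk' : ∀ q ∈ t', k ≤ q.1 := fun q hq => hk q (List.mem_cons_of_mem _ hq)
    by_cases hpk : p.1 = k
    · have hb : (p.1 == k) = true := by simpa using hpk
      obtain ⟨h1, h2⟩ := ih hpw.2 hk'
      simp [hb, h1, h2]
    · have hb : (p.1 == k) = false := by simpa using hpk
      have hlt : k < p.1 := lt_of_le_of_ne hk0 (fun h => hpk h.symm)
      have hnone : ∀ q ∈ t', (q.1 == k) = false := by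
        intro q hq
        have := hpw.1 q hq
        simp; omega
      constructor
      · rw [List.takeWhile_cons, hb]
        rw [List.filter_cons, hb]
        symm
        exact List.filter_eq_nil_iff.mpr (fun q hq => by simp [hnone q hq])
      · rw [List.dropWhile_cons, hb]
        rw [List.filter_cons, hb]
        simp only [Bool.not_false]
        rw [List.filter_eq_self.mpr (fun q hq => by simp [hnone q hq])]
        simp

-- groupby on a key-sorted pair list: strictly increasing keys, same key set, groups = filters
theorem pvGR_main (ps : List (Int × Int)) (hpw : ps.Pairwise (fun a b => a.1 ≤ b.1)) :
    ((pvGroupRuns ps).map (fun g => g.1)).Pairwise (· < ·) ∧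
    (∀ x, x ∈ (pvGroupRuns ps).map (fun g => g.1) ↔ x ∈ ps.map (fun p => p.1)) ∧
    (∀ g ∈ pvGroupRuns ps, g.2 = (ps.filter (fun p => p.1 == g.1)).map (fun p => p.2)) := by
  induction ps using pvGroupRuns.induct with
  | case1 => simp [pvGroupRuns]
  | case2 k v t ih =>
    rw [List.pairwise_cons] at hpw
    have hkt : ∀ q ∈ t, k ≤ q.1 := fun q hq => hpw.1 q hq
    obtain ⟨htake, hdrop⟩ := pvTakeDrop k t hpw.2 hkt
    have hpw' : (t.dropWhile (fun p => p.1 == k)).Pairwise (fun a b => a.1 ≤ b.1) := by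
      rw [hdrop]; exact hpw.2.filter _
    obtain ⟨ih1, ih2, ih3⟩ := ih hpw'
    have hmem' : ∀ x, x ∈ (t.dropWhile (fun p => p.1 == k)).map (fun p => p.1) ↔
        (x ∈ t.map (fun p => p.1) ∧ x ≠ k) := by
      intro x
      rw [hdrop]
      constructor
      · rintro hx
        obtain ⟨q, hq, rfl⟩ := List.mem_map.mp hx
        obtain ⟨hq1, hq2⟩ := List.mem_filter.mp hq
        refine ⟨List.mem_map.mpr ⟨q, hq1, rfl⟩, by simpa using hq2⟩
      · rintro ⟨hx, hne⟩
        obtain ⟨q, hq, rfl⟩ := List.mem_map.mp hx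
        exact List.mem_map.mpr ⟨q, List.mem_filter.mpr ⟨hq, by simpa using hne⟩, rfl⟩
    have hgr : pvGroupRuns ((k, v) :: t) =
        (k, v :: (t.takeWhile (fun p => p.1 == k)).map (fun p => p.2)) ::
          pvGroupRuns (t.dropWhile (fun p => p.1 == k)) := by
      rw [pvGroupRuns]
    refine ⟨?_, ?_, ?_⟩
    · rw [hgr]
      simp only [List.map_cons]
      rw [List.pairwise_cons]
      refine ⟨?_, ih1⟩
      intro x hx
      have := (ih2 x).mp hx
      have hx' := (hmem' x).mp this
      obtain ⟨q, hq, rfl⟩ := List.mem_map.mp hx'.1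
      have := hkt q hq
      have := hx'.2
      omega
    · intro x
      rw [hgr]
      simp only [List.map_cons, List.mem_cons]
      rw [ih2, hmem' x]
      constructor
      · rintro (rfl | ⟨h, _⟩)
        · exact Or.inl rfl
        · exact Or.inr h
      · rintro (rfl | h)
        · exact Or.inl rfl
        · by_cases hxk : x = k
          · exact Or.inl hxk
          · exact Or.inr ⟨h, hxk⟩
    · intro g hg
      rw [hgr] at hg
      rcases List.mem_cons.mp hg with rfl | hg'
      · show v :: _ = _
        rw [htake, List.filter_cons]
        simp
      · have h3 := ih3 g hg'
        have hgk : g.1 ∈ (t.dropWhile (fun p => p.1 == k)).map (fun p => p.1) :=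
          (ih2 g.1).mp (List.mem_map.mpr ⟨g, hg', rfl⟩)
        have hgne : g.1 ≠ k := ((hmem' g.1).mp hgk).2
        rw [h3, hdrop, List.filter_filter]
        rw [List.filter_cons]
        have hb : (k == g.1) = false := by simp; exact fun h => hgne h.symm
        simp only [hb]
        congr 1
        apply List.filter_congr
        intro q hq
        by_cases hq1 : q.1 = g.1
        · simp [hq1, hgne]
        · simp [hq1]

-- ===== A reduced to canonical form =====
theorem pvA_eq (u : Int) (f0 : List (String × Int)) (t0 : List (List (String × Int))) :
    render_risk_user_wal u (f0 :: t0) =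
      pvTable ["Symbol", "Net (WAL)", "Fills"]
        (PySem.Str.join "" ((pvCanon (f0 :: t0)).map
          (fun k => pvRow k (netOf u (f0 :: t0) k) (cntOf (f0 :: t0) k)))) := by
  unfold render_risk_user_wal
  rw [pvStep_eq u]
  have hkeys := pvFold_keys u (f0 :: t0)
  have hnodup := pvFold_nodup u (f0 :: t0)
  set P := (f0 :: t0).foldl (pvStep u) PySem.Dict.empty with hP
  have hne : P.items ≠ [] := by
    intro h
    have hk : P.keys = [] := by
      show P.items.map _ = []
      rw [h]; rfl
    rw [hkeys] at hk
    have : pvSid f0 ∈ PySem.Set.ofList ((f0 :: t0).map pvSid) := by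
      rw [PySem.Set.mem_ofList]; simp
    rw [hk] at this
    exact absurd this (List.not_mem_nil)
  rw [if_neg hne]
  have hitems := PySem.Dict.items_eq_map_keys P hnodup ((0 : Int), (0 : Int))
  have hgetD : ∀ k, P.getD k (0, 0) = (netOf u (f0 :: t0) k, cntOf (f0 :: t0) k) := by
    intro k
    rw [hP, pvFold_getD]
    simp [PySem.Dict.getD_empty]
  have hsorted : PySem.List.sorted P.items (fun p => p.1) false =
      (pvCanon (f0 :: t0)).map (fun k => (k, P.getD k (0, 0))) := by
    apply PySem.List.sorted_eq_of_perm_of_pairwise_lt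
    · rw [hitems]
      apply List.Perm.map
      have : pvCanon (f0 :: t0) |>.Perm (PySem.Set.ofList ((f0 :: t0).map pvSid)) :=
        PySem.List.sorted_perm _ _ _
      rw [hkeys]
      exact this
    · rw [List.pairwise_map]
      exact pvCanon_lt (f0 :: t0)
  simp only [hsorted]
  rw [pvStrFoldl]
  have h0 : ∀ (s : String), "" ++ s = s := fun s => by simp
  rw [h0]
  refine congrArg (pvTable ["Symbol", "Net (WAL)", "Fills"]) ?_
  refine congrArg (PySem.Str.join "") ?_
  rw [List.map_map]
  apply List.map_congr_left
  intro k _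
  simp only [Function.comp]
  rw [hgetD k]
  simp only [pvRow]

-- ===== B reduced to canonical form =====
theorem pvB_eq (u : Int) (f0 : List (String × Int)) (t0 : List (List (String × Int))) :
    render_risk_user_wal_alt u (f0 :: t0) =
      pvTable ["Symbol", "Net (WAL)", "Fills"]
        (PySem.Str.join "" ((pvCanon (f0 :: t0)).map
          (fun k => pvRow k (netOf u (f0 :: t0) k) (cntOf (f0 :: t0) k)))) := by
  unfold render_risk_user_wal_alt
  rw [if_neg (by simp : ¬(f0 :: t0 : List (List (String × Int))) = [])]
  have hlam : (fun f : List (String × Int) =>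
      let fd := PySem.Dict.mk f
      (fd.getD "symbol_id" 0,
       if (fd.get? "taker_uid" == some u) = (fd.getD "taker_side" 0 == 0)
       then fd.getD "qty" 0 else -(fd.getD "qty" 0))) = pvPre u := rfl
  rw [hlam]
  set fills := f0 :: t0
  set keyed := PySem.List.sorted (fills.map (pvPre u)) (fun p => p.1) false with hkeyed
  have hpw : keyed.Pairwise (fun a b => a.1 ≤ b.1) := PySem.List.sorted_pairwise _ _
  obtain ⟨g1, g2, g3⟩ := pvGR_main keyed hpw
  have hmemB : ∀ x, x ∈ (pvGroupRuns keyed).map (fun g => g.1) ↔ x ∈ fills.map pvSid := by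
    intro x
    rw [g2 x]
    constructor
    · intro hx
      obtain ⟨p, hp, rfl⟩ := List.mem_map.mp hx
      rw [hkeyed, PySem.List.mem_sorted] at hp
      obtain ⟨f, hf, rfl⟩ := List.mem_map.mp hp
      exact List.mem_map.mpr ⟨f, hf, rfl⟩
    · intro hx
      obtain ⟨f, hf, rfl⟩ := List.mem_map.mp hx
      refine List.mem_map.mpr ⟨pvPre u f, ?_, rfl⟩
      rw [hkeyed, PySem.List.mem_sorted]
      exact List.mem_map.mpr ⟨f, hf, rfl⟩
  have hkeysB : (pvGroupRuns keyed).map (fun g => g.1) = pvCanon fills := by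
    apply List.eq_of_perm_of_sorted (le := fun a b : Int => a < b)
    · intro a b _ _ h1 h2; omega
    · exact g1
    · exact pvCanon_lt fills
    · rw [List.perm_ext_iff_of_nodup (g1.imp (fun h => ne_of_lt h)) (pvCanon_nodup fills)]
      intro x
      rw [hmemB x, pvCanon_mem]
  have hgr : pvGroupRuns keyed = (pvCanon fills).map
      (fun k => (k, (keyed.filter (fun p => p.1 == k)).map (fun p => p.2))) := by
    conv_lhs => rw [← List.map_id (pvGroupRuns keyed)]
    rw [List.map_congr_left (g := fun g => (g.1,
      (keyed.filter (fun p => p.1 == g.1)).map (fun p => p.2)))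
      (fun g hg => by rw [id]; exact Prod.ext rfl (g3 g hg))]
    rw [show (fun (g : Int × List Int) => (g.1, (keyed.filter (fun p => p.1 == g.1)).map (fun p => p.2)))
      = (fun k => (k, (keyed.filter (fun p => p.1 == k)).map (fun p => p.2))) ∘ (fun g => g.1) from rfl]
    rw [← List.map_map, hkeysB]
  show pvTable ["Symbol", "Net (WAL)", "Fills"] (PySem.Str.join ""
    ((pvGroupRuns keyed).map (fun g => pvRow g.1 g.2.sum (g.2.length : Int)))) = _
  rw [hgr, List.map_map]
  refine congrArg (pvTable ["Symbol", "Net (WAL)", "Fills"]) ?_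
  refine congrArg (PySem.Str.join "") ?_
  apply List.map_congr_left
  intro k _
  have hperm : (keyed.filter (fun p => p.1 == k)).Perm
      ((fills.map (pvPre u)).filter (fun p => p.1 == k)) :=
    (PySem.List.sorted_perm _ _ _).filter _
  have hfm : ((fills.map (pvPre u)).filter (fun p => p.1 == k)) =
      (fills.filter (fun f => pvSid f == k)).map (pvPre u) := by
    rw [List.filter_map]
    rfl
  have hsum : ((keyed.filter (fun p => p.1 == k)).map (fun p => p.2)).sum = netOf u fills k := by
    rw [(hperm.map (fun p => p.2)).sum_eq, hfm, List.map_map]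
    rfl
  have hlen : (((keyed.filter (fun p => p.1 == k)).map (fun p => p.2)).length : Int) =
      cntOf fills k := by
    rw [List.length_map, hperm.length_eq, hfm, List.length_map]
    rfl
  show pvRow k ((keyed.filter (fun p => p.1 == k)).map (fun p => p.2)).sum
      (((keyed.filter (fun p => p.1 == k)).map (fun p => p.2)).length : Int)
    = pvRow k (netOf u fills k) (cntOf fills k)
  rw [hsum, hlen]

-- ===== VERDICT (by name: the statement is the Claim_ definition above) =====
theorem render_risk_user_wal_spec : Claim_equal_render_risk_user_wal := by
  intro u fills _
  show render_risk_user_wal u fills = render_risk_user_wal_alt u fills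
  cases fills with
  | nil => rfl
  | cons f0 t0 => rw [pvA_eq, pvB_eq]
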